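-- pv_equiv track=rewrite | github.com/miliar/Code_Jam_Webscraper | solutions_python/Problem_181/1645.py | solve
-- ===== SOURCE A (Python) =====
-- from collections import deque
--
-- def solve(s):
--     result = deque()
--     for char in s:
--         if result and result[0] <= char:
--             result.appendleft(char)
--         else:
--             result.append(char)
--     return ''.join(result)
-- ===== SOURCE B (Python) =====
-- def solve(s):
--     if not s:
--         return ""
--     # staged: precompute the prefix-maximum array, then classify declaratively:
--     # a char (past the first) ends up in the reversed front part iff it equals
--     # the prefix maximum at its own position.
--     m = []
--     cur = s[0]
--     for c in s:
--         if c > cur: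
--             cur = c
--         m.append(cur)
--     pairs = list(zip(s, m))[1:]
--     front = [c for (c, p) in reversed(pairs) if c == p]
--     back = [s[0]] + [c for (c, p) in pairs if c != p]
--     return ''.join(front + back)
-- ===== Notes on version B (the rewrite author's own statement) =====
-- stated objective: alternative
-- what changed: Replaces A's online deque (decide prepend/append from the deque's head while building) with a staged algorithm: first compute the prefix-maximum array, then declaratively classify each char (it goes to the reversed front part iff it equals the prefix maximum at its position) and join the two parts.
import Mathlib
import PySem

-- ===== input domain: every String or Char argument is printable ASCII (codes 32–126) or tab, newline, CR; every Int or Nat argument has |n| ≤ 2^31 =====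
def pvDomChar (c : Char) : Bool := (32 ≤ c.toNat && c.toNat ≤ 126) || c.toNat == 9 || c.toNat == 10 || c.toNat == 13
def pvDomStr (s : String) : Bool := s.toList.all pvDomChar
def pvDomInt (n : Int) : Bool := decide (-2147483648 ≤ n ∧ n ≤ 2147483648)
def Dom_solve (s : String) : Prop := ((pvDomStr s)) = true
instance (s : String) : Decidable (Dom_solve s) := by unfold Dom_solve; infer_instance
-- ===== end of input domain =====

-- B replaces A's online deque simulation by a staged algorithm: precompute the
-- prefix-maximum array, then classify each char declaratively (front iff it
-- equals the prefix maximum at its position); same O(n) cost, different structure.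

-- ===== PORT A =====
-- one iteration of A's loop: deque as a list (result[0] = head, appendleft = cons, append = ++ [c])
def solveStepA (result : List Char) (c : Char) : List Char :=
  match result with
  | [] => result ++ [c]                         -- 'if result' is false: append
  | r0 :: _ => if r0 ≤ c then c :: result else result ++ [c]

def solve (s : String) : String :=
  String.mk (s.toList.foldl solveStepA [])

-- ===== PORT B =====
-- one iteration of B's prefix-maximum loop: state (cur, m), 'if c > cur: cur = c; m.append(cur)'
def prefStepB (st : Char × List Char) (c : Char) : Char × List Char :=
  let cur := if c > st.1 then c else st.1
  (cur, st.2 ++ [cur])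

def solve_alt (s : String) : String :=
  match s.toList with
  | [] => ""
  | c0 :: _ =>
    let cs := s.toList
    let m := (cs.foldl prefStepB (c0, [])).2
    let pairs := (cs.zip m).drop 1
    let front := (pairs.reverse.filter (fun cp => cp.1 == cp.2)).map Prod.fst
    let back := c0 :: (pairs.filter (fun cp => cp.1 != cp.2)).map Prod.fst
    String.mk (front ++ back)

-- ===== PRECONDITION & SPEC =====
def Spec_solve (s : String) (out : String) : Prop := out = solve_alt s
instance (s : String) (out : String) : Decidable (Spec_solve s out) := by unfold Spec_solve; infer_instance

-- ===== CLAIM (what is proved, stated in full; the proofs are below) =====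
def Claim_equal_solve : Prop := ∀ (s : String), Dom_solve s → Spec_solve s (solve s)

-- ===== LEMMAS AND PROOFS =====

-- the recursive prefix-maximum list
def pm (cs : List Char) (cur : Char) : List Char :=
  match cs with
  | [] => []
  | c :: cs' => let cur' := if cur < c then c else cur; cur' :: pm cs' cur'

-- chars that A prepends (in processing order) / appends, given current head cur
def fronts (cs : List Char) (cur : Char) : List Char :=
  match cs with
  | [] => []
  | c :: cs' => if cur ≤ c then c :: fronts cs' c else fronts cs' cur

def backs (cs : List Char) (cur : Char) : List Char :=
  match cs with
  | [] => []
  | c :: cs' => if cur ≤ c then backs cs' c else c :: backs cs' cur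

theorem pref_acc (cs : List Char) : ∀ (cur : Char) (acc : List Char),
    (List.foldl prefStepB (cur, acc) cs).2 = acc ++ pm cs cur := by
  induction cs with
  | nil => intro cur acc; simp [pm]
  | cons c cs ih =>
    intro cur acc
    simp only [List.foldl_cons, prefStepB, pm]
    rw [ih]
    simp

-- A's loop invariant: deque cur :: tail with cur at the head
theorem solveA_inv (cs : List Char) : ∀ (cur : Char) (tail : List Char),
    List.foldl solveStepA (cur :: tail) cs =
      (fronts cs cur).reverse ++ cur :: (tail ++ backs cs cur) := by
  induction cs with
  | nil => intro cur tail; simp [fronts, backs]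
  | cons c cs ih =>
    intro cur tail
    simp only [List.foldl_cons, solveStepA, fronts, backs]
    by_cases hle : cur ≤ c
    · simp only [if_pos hle]
      rw [ih c (cur :: tail)]
      simp
    · simp only [if_neg hle]
      have : (cur :: tail) ++ [c] = cur :: (tail ++ [c]) := by simp
      rw [this, ih cur (tail ++ [c])]
      simp

-- zip-with-prefix-max filters compute fronts / backs
theorem zip_pm_filter_eq (cs : List Char) : ∀ (cur : Char),
    ((cs.zip (pm cs cur)).filter (fun cp => cp.1 == cp.2)).map Prod.fst = fronts cs cur ∧
    ((cs.zip (pm cs cur)).filter (fun cp => cp.1 != cp.2)).map Prod.fst = backs cs cur := by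
  induction cs with
  | nil => intro cur; simp [pm, fronts, backs]
  | cons c cs ih =>
    intro cur
    simp only [pm, List.zip_cons_cons, List.filter_cons, fronts, backs]
    by_cases hle : cur ≤ c
    · have hcur' : (if cur < c then c else cur) = c := by
        rcases lt_or_eq_of_le hle with h | h
        · simp [h]
        · simp [h]
      rw [hcur']
      constructor
      · simp [hle, (ih c).1]
      · simp [hle, (ih c).2]
    · have hlt : c < cur := lt_of_not_ge hle
      have hcur' : (if cur < c then c else cur) = cur := by
        simp [not_lt_of_gt hlt]
      have hne : c ≠ cur := ne_of_lt hlt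
      rw [hcur']
      constructor
      · simp [hle, hne, (ih cur).1]
      · simp [hle, hne, (ih cur).2]

-- ===== VERDICT (by name: the statement is the Claim_ definition above) =====
theorem solve_spec : Claim_equal_solve := by
  intro s _
  unfold Spec_solve solve solve_alt
  cases s.toList with
  | nil => rfl
  | cons c0 rest =>
    show _ = String.mk _
    have hfold : List.foldl solveStepA [] (c0 :: rest) =
        (fronts rest c0).reverse ++ c0 :: backs rest c0 := by
      have h0 : solveStepA [] c0 = [c0] := rfl
      simp only [List.foldl_cons, h0]
      have := solveA_inv rest c0 []
      simpa using this
    rw [hfold]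
    have hm : (List.foldl prefStepB (c0, []) (c0 :: rest)).2 = c0 :: pm rest c0 := by
      rw [pref_acc]
      simp [pm]
    rw [hm]
    simp only [List.zip_cons_cons, List.drop_succ_cons, List.drop_zero]
    rw [List.filter_reverse, List.map_reverse]
    rw [(zip_pm_filter_eq rest c0).1, (zip_pm_filter_eq rest c0).2]
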